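-- pv_equiv track=rewrite | github.com/jo49973477/codetree-TILs | 240720/최적의 십자 모양 폭발/best-cross-shape-bomb.py | nomuhyeon
-- ===== SOURCE A (Python) =====
-- def nomuhyeon(bombs):
--     N = len(bombs)
--     new_bombs = [[0 for _ in range(N)] for _ in range(N)]
--
--     for col in range(N):
--         last = N-1
--         for row in range(N-1, -1, -1):
--             if bombs[row][col] == 0:
--                 continue
--             else:
--                 new_bombs[last][col] = bombs[row][col]
--                 last -= 1
--
--     return new_bombs
-- ===== SOURCE B (Python) =====
-- def nomuhyeon(bombs):
--     N = len(bombs)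
--     cols = []
--     for c in range(N):
--         vals = [bombs[r][c] for r in range(N) if bombs[r][c] != 0]
--         cols.append([0] * (N - len(vals)) + vals)
--     return [[cols[c][r] for c in range(N)] for r in range(N)]
-- ===== Notes on version B (the rewrite author's own statement) =====
-- stated objective: simpler
-- what changed: Replaces A's in-place downward write-cursor pass over a preallocated NxN zero grid with a per-column gather of nonzero values followed by zeros-prefix concatenation and a transpose back to rows.
import Mathlib
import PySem

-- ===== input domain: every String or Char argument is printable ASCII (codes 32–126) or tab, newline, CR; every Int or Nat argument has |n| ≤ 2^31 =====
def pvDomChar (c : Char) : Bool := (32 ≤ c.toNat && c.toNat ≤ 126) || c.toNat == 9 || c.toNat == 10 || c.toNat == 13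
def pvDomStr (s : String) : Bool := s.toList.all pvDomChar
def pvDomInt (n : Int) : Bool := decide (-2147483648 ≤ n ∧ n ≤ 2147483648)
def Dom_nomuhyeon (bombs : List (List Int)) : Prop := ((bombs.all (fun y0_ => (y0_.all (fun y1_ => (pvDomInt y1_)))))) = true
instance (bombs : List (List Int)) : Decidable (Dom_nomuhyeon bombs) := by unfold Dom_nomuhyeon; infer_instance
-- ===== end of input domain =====

-- B replaces A's in-place downward write-cursor pass over a preallocated zero grid with a
-- per-column gather of nonzeros + zeros-prefix concatenation + a transpose (objective: simpler).

-- ===== PORT A =====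
-- Python's cursor `last` is kept as a Nat: in Python it reaches -1 only after the final write of
-- a column with no zeros, where it is never used again, so the computed grids coincide.
-- bombs[row][col] is ported as getD; under Pre_ both indices are always in range.
def nomuhyeon (bombs : List (List Int)) : List (List Int) :=
  let N := bombs.length
  let new0 : List (List Int) := List.replicate N (List.replicate N 0)
  (List.range N).foldl (fun nb col =>
    (((List.range N).reverse).foldl (fun (st : List (List Int) × Nat) row =>
        if (bombs.getD row []).getD col 0 = 0 then st
        else (st.1.modify st.2 (fun rw => rw.set col ((bombs.getD row []).getD col 0)), st.2 - 1))
      (nb, N - 1)).1) new0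

-- ===== PORT B =====
def nomuhyeon_alt (bombs : List (List Int)) : List (List Int) :=
  let N := bombs.length
  let cols : List (List Int) := (List.range N).map (fun c =>
    let vals := ((List.range N).map (fun r => (bombs.getD r []).getD c 0)).filter (fun v => v ≠ 0)
    List.replicate (N - vals.length) 0 ++ vals)
  (List.range N).map (fun r => (List.range N).map (fun c => (cols.getD c []).getD r 0))

-- ===== PRECONDITION & SPEC =====
-- Pre_ excludes exactly the ragged grids on which the Python A raises IndexError
-- (some row shorter than len(bombs)); it admits every input A returns on.
def Pre_nomuhyeon (bombs : List (List Int)) : Prop :=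
  ∀ row ∈ bombs, bombs.length ≤ row.length
instance (bombs : List (List Int)) : Decidable (Pre_nomuhyeon bombs) := by
  unfold Pre_nomuhyeon; infer_instance

def pvWitness_nomuhyeon : List (List Int) := [[0, 3, 0], [1, 0, 0], [0, 2, 5]]

def Spec_nomuhyeon (bombs : List (List Int)) (out : List (List Int)) : Prop := out = nomuhyeon_alt bombs
instance (bombs : List (List Int)) (out : List (List Int)) : Decidable (Spec_nomuhyeon bombs out) := by unfold Spec_nomuhyeon; infer_instance

-- ===== CLAIM (what is proved, stated in full; the proofs are below) =====
def Claim_equal_nomuhyeon : Prop := ∀ (bombs : List (List Int)), Dom_nomuhyeon bombs → Pre_nomuhyeon bombs → Spec_nomuhyeon bombs (nomuhyeon bombs)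

-- ===== LEMMAS AND PROOFS =====

-- the (r,c) entry of a grid, 0 when out of range (mirrors the getD defaults used in the ports)
def pvEntry (nb : List (List Int)) (r c : Nat) : Int := (nb.getD r []).getD c 0

-- the value both ports read at (r,c) of the input
def pvG (bombs : List (List Int)) (r c : Nat) : Int := (bombs.getD r []).getD c 0

-- nonzero values of column c, top to bottom
def pvVals (bombs : List (List Int)) (c : Nat) : List Int :=
  ((List.range bombs.length).map (fun r => pvG bombs r c)).filter (fun v => v ≠ 0)

-- what A's inner loop does: write vs at rows last, last-1, … of column c
def pvWrite (c : Nat) : List (List Int) → Nat → List Int → List (List Int)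
  | nb, _, [] => nb
  | nb, last, v :: vs => pvWrite c (nb.modify last (fun rw => rw.set c v)) (last - 1) vs

-- the final value of column c at row r
def pvColEntry (bombs : List (List Int)) (c r : Nat) : Int :=
  if r ≤ bombs.length - 1 ∧ bombs.length - 1 < r + (pvVals bombs c).length then
    (pvVals bombs c).reverse.getD (bombs.length - 1 - r) 0
  else 0

-- A's inner loop over the column, as a fold abstraction
def pvStep (bombs : List (List Int)) (nb : List (List Int)) (col : Nat) : List (List Int) :=
  (((List.range bombs.length).reverse).foldl (fun (st : List (List Int) × Nat) row =>
      if (bombs.getD row []).getD col 0 = 0 then st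
      else (st.1.modify st.2 (fun rw => rw.set col ((bombs.getD row []).getD col 0)), st.2 - 1))
    (nb, bombs.length - 1)).1

theorem pvM_len (nb : List (List Int)) (last c : Nat) (v : Int) (i : Nat) :
    (((nb.modify last (fun rw => rw.set c v)).getD i []).length) = (nb.getD i []).length := by
  by_cases hi : i < nb.length
  · rw [List.getD_eq_getElem _ _ (by simpa [List.length_modify] using hi),
        List.getElem_modify, List.getD_eq_getElem _ _ hi]
    split <;> simp [List.length_set]
  · rw [List.getD_eq_default _ _ (by simpa [List.length_modify] using (Nat.le_of_not_lt hi)),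
        List.getD_eq_default _ _ (Nat.le_of_not_lt hi)]

theorem pvWrite_length (c : Nat) (vs : List Int) : ∀ nb last, (pvWrite c nb last vs).length = nb.length := by
  induction vs with
  | nil => intro nb last; rfl
  | cons v vs ih => intro nb last; simp [pvWrite, ih, List.length_modify]

theorem pvWrite_rowlen (c : Nat) (vs : List Int) : ∀ nb last i,
    ((pvWrite c nb last vs).getD i []).length = (nb.getD i []).length := by
  induction vs with
  | nil => intro nb last i; rfl
  | cons v vs ih => intro nb last i; rw [pvWrite, ih, pvM_len]

theorem getD_set_ne (l : List Int) (c c' : Nat) (v : Int) (h : c' ≠ c) :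
    (l.set c v).getD c' 0 = l.getD c' 0 := by
  by_cases hlt : c' < l.length
  · rw [List.getD_eq_getElem _ _ (by simpa [List.length_set] using hlt),
        List.getElem_set_ne (fun hx => h hx.symm), List.getD_eq_getElem _ _ hlt]
  · rw [List.getD_eq_default _ _ (by simpa [List.length_set] using Nat.le_of_not_lt hlt),
        List.getD_eq_default _ _ (Nat.le_of_not_lt hlt)]

theorem entry_modify_set (nb : List (List Int)) (last c : Nat) (v : Int) (r c' : Nat)
    (hN : last < nb.length) (hc : c < (nb.getD last []).length) :
    pvEntry (nb.modify last (fun rw => rw.set c v)) r c' =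
      if r = last ∧ c' = c then v else pvEntry nb r c' := by
  unfold pvEntry
  by_cases hr : r = last
  · subst hr
    have e1 : (nb.modify r (fun rw => rw.set c v)).getD r [] = (nb.getD r []).set c v := by
      rw [List.getD_eq_getElem _ _ (by simpa [List.length_modify] using hN),
          List.getElem_modify, if_pos rfl, List.getD_eq_getElem _ _ hN]
    rw [e1]
    by_cases hcc : c' = c
    · subst hcc
      rw [if_pos ⟨rfl, rfl⟩, List.getD_eq_getElem _ _ (by simpa [List.length_set] using hc),
          List.getElem_set_self]
    · rw [if_neg (fun h => hcc h.2), getD_set_ne _ _ _ _ hcc]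
  · have e2 : (nb.modify last (fun rw => rw.set c v)).getD r [] = nb.getD r [] := by
      by_cases hrl : r < nb.length
      · rw [List.getD_eq_getElem _ _ (by simpa [List.length_modify] using hrl),
            List.getElem_modify, if_neg (fun h => hr h.symm), List.getD_eq_getElem _ _ hrl]
      · rw [List.getD_eq_default _ _ (by simpa [List.length_modify] using Nat.le_of_not_lt hrl),
            List.getD_eq_default _ _ (Nat.le_of_not_lt hrl)]
    rw [e2, if_neg (fun h => hr h.1)]

theorem pvWrite_entry (c : Nat) (vs : List Int) : ∀ (nb : List (List Int)) (last r c' : Nat),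
    vs.length ≤ last + 1 → last < nb.length →
    (∀ i, i < nb.length → c < (nb.getD i []).length) →
    pvEntry (pvWrite c nb last vs) r c' =
      if c' = c ∧ r ≤ last ∧ last < r + vs.length then vs.getD (last - r) 0
      else pvEntry nb r c' := by
  induction vs with
  | nil => intro nb last r c' _ _ _; simp [pvWrite]
  | cons v vs ih =>
    intro nb last r c' hlen hN hrows
    have hlen' : vs.length ≤ (last - 1) + 1 := by simp at hlen; omega
    have hN' : last - 1 < (nb.modify last (fun rw => rw.set c v)).length := by
      rw [List.length_modify]; omega
    have hrows' : ∀ i, i < (nb.modify last (fun rw => rw.set c v)).length →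
        c < ((nb.modify last (fun rw => rw.set c v)).getD i []).length := by
      intro i hi; rw [pvM_len]; exact hrows i (by simpa [List.length_modify] using hi)
    rw [pvWrite, ih _ _ _ _ hlen' hN' hrows',
        entry_modify_set nb last c v r c' hN (hrows last hN)]
    have hmle : vs.length ≤ last := by simpa using hlen
    simp only [List.length_cons]
    split_ifs with h1 h2 h3 h4 h5
    · have hx : last - r = (last - 1 - r) + 1 := by omega
      rw [hx, List.getD_cons_succ]
    · omega
    · have hx : last - r = 0 := by omega
      rw [hx, List.getD_cons_zero]
    · omega
    · omega
    · rfl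

theorem inner_eq_write (bombs : List (List Int)) (col : Nat) (rs : List Nat) :
    ∀ nb (last : Nat),
    ((rs.foldl (fun (st : List (List Int) × Nat) row =>
        if (bombs.getD row []).getD col 0 = 0 then st
        else (st.1.modify st.2 (fun rw => rw.set col ((bombs.getD row []).getD col 0)), st.2 - 1))
      (nb, last)).1)
    = pvWrite col nb last ((rs.map (fun r => pvG bombs r col)).filter (fun v => v ≠ 0)) := by
  induction rs with
  | nil => intro nb last; rfl
  | cons r rs ih =>
    intro nb last
    rw [List.foldl_cons]
    by_cases h : (bombs.getD r []).getD col 0 = 0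
    · rw [if_pos h, ih]
      congr 1
      rw [List.map_cons, List.filter_cons]
      have hd : (decide (pvG bombs r col ≠ 0)) = false := by simpa [pvG] using h
      simp only [hd, Bool.false_eq_true, if_false]
    · rw [if_neg h, ih, List.map_cons, List.filter_cons]
      have hd : (decide (pvG bombs r col ≠ 0)) = true := by simpa [pvG] using h
      simp only [hd, if_true]
      rfl

theorem pvStep_eq (bombs : List (List Int)) (nb : List (List Int)) (col : Nat) :
    pvStep bombs nb col = pvWrite col nb (bombs.length - 1) ((pvVals bombs col).reverse) := by
  unfold pvStep
  rw [inner_eq_write]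
  rw [List.map_reverse, List.filter_reverse]
  rfl

theorem pvVals_len_le (bombs : List (List Int)) (c : Nat) :
    (pvVals bombs c).length ≤ bombs.length := by
  unfold pvVals
  calc _ ≤ ((List.range bombs.length).map (fun r => pvG bombs r c)).length :=
        List.length_filter_le _ _
    _ = bombs.length := by simp

theorem pvStep_len (bombs nb : List (List Int)) (col : Nat) :
    (pvStep bombs nb col).length = nb.length := by
  rw [pvStep_eq, pvWrite_length]

theorem pvStep_rowlen (bombs nb : List (List Int)) (col i : Nat) :
    ((pvStep bombs nb col).getD i []).length = (nb.getD i []).length := by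
  rw [pvStep_eq, pvWrite_rowlen]

theorem pvStep_entry (bombs : List (List Int)) (col : Nat) (hcol : col < bombs.length)
    (hpos : 0 < bombs.length) (nb : List (List Int)) (hlen : nb.length = bombs.length)
    (hrows : ∀ i, i < nb.length → (nb.getD i []).length = bombs.length)
    (h0 : ∀ r, pvEntry nb r col = 0) (r c' : Nat) :
    pvEntry (pvStep bombs nb col) r c' =
      if c' = col then pvColEntry bombs col r else pvEntry nb r c' := by
  rw [pvStep_eq, pvWrite_entry _ _ nb (bombs.length - 1) r c'
      (by rw [List.length_reverse]; have := pvVals_len_le bombs col; omega)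
      (by omega)
      (fun i hi => by rw [hrows i hi]; exact hcol)]
  rw [List.length_reverse]
  by_cases hcc : c' = col
  · rw [if_pos hcc]
    subst hcc
    unfold pvColEntry
    by_cases hcond : r ≤ bombs.length - 1 ∧ bombs.length - 1 < r + (pvVals bombs c').length
    · rw [if_pos ⟨rfl, hcond.1, hcond.2⟩, if_pos hcond]
    · rw [if_neg (fun hx => hcond ⟨hx.2.1, hx.2.2⟩), if_neg hcond]
      exact h0 r
  · rw [if_neg (fun hx => hcc hx.1), if_neg hcc]

theorem outer_fold (bombs : List (List Int)) (hpos : 0 < bombs.length) :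
    ∀ (cs : List Nat), cs.Nodup → (∀ c ∈ cs, c < bombs.length) →
    ∀ (nb : List (List Int)), nb.length = bombs.length →
    (∀ i, i < nb.length → (nb.getD i []).length = bombs.length) →
    (∀ c ∈ cs, ∀ r, pvEntry nb r c = 0) →
    (cs.foldl (pvStep bombs) nb).length = bombs.length ∧
    (∀ i, i < (cs.foldl (pvStep bombs) nb).length →
        ((cs.foldl (pvStep bombs) nb).getD i []).length = bombs.length) ∧
    (∀ r c', pvEntry (cs.foldl (pvStep bombs) nb) r c' =
        if c' ∈ cs then pvColEntry bombs c' r else pvEntry nb r c') := by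
  intro cs
  induction cs with
  | nil =>
    intro _ _ nb hlen hrows _
    refine ⟨hlen, hrows, ?_⟩
    intro r c'; simp
  | cons c₀ cs ih =>
    intro hnd hb nb hlen hrows h0
    have hnd' : cs.Nodup := (List.nodup_cons.mp hnd).2
    have hc₀ : c₀ ∉ cs := (List.nodup_cons.mp hnd).1
    have hc₀N : c₀ < bombs.length := hb c₀ List.mem_cons_self
    have hlen' : (pvStep bombs nb c₀).length = bombs.length := by rw [pvStep_len]; exact hlen
    have hrows' : ∀ i, i < (pvStep bombs nb c₀).length →
        ((pvStep bombs nb c₀).getD i []).length = bombs.length := by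
      intro i hi
      rw [pvStep_rowlen]
      exact hrows i (by rw [← pvStep_len bombs nb c₀]; exact hi)
    have h0' : ∀ c ∈ cs, ∀ r, pvEntry (pvStep bombs nb c₀) r c = 0 := by
      intro c hc r
      have hne : ¬ c = c₀ := fun h => hc₀ (h ▸ hc)
      rw [pvStep_entry bombs c₀ hc₀N hpos nb hlen hrows (h0 c₀ List.mem_cons_self) r c,
          if_neg hne]
      exact h0 c (List.mem_cons_of_mem _ hc) r
    obtain ⟨L, R, ENT⟩ := ih hnd' (fun c hc => hb c (List.mem_cons_of_mem _ hc))
      (pvStep bombs nb c₀) hlen' hrows' h0'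
    refine ⟨by simpa using L, by simpa using R, ?_⟩
    intro r c'
    rw [List.foldl_cons, ENT r c']
    by_cases h1 : c' ∈ cs
    · simp [h1, List.mem_cons]
    · rw [if_neg h1,
        pvStep_entry bombs c₀ hc₀N hpos nb hlen hrows (h0 c₀ List.mem_cons_self) r c']
      by_cases h2 : c' = c₀
      · subst h2; simp
      · simp [h1, h2]

theorem zero_rowlen (N i : Nat) (hi : i < N) :
    ((List.replicate N (List.replicate N (0:Int))).getD i []).length = N := by
  rw [List.getD_eq_getElem _ _ (by simpa using hi), List.getElem_replicate, List.length_replicate]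

theorem zero_entry (N r c : Nat) :
    pvEntry (List.replicate N (List.replicate N (0:Int))) r c = 0 := by
  unfold pvEntry
  by_cases hr : r < N
  · have h1 : (List.replicate N (List.replicate N (0:Int))).getD r [] = List.replicate N (0:Int) := by
      rw [List.getD_eq_getElem _ _ (by simpa using hr), List.getElem_replicate]
    rw [h1]
    by_cases hc : c < N
    · rw [List.getD_eq_getElem _ _ (by simpa using hc), List.getElem_replicate]
    · rw [List.getD_eq_default _ _ (by simpa using Nat.le_of_not_lt hc)]
  · have h1 : (List.replicate N (List.replicate N (0:Int))).getD r [] = [] :=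
      List.getD_eq_default _ _ (by simpa using Nat.le_of_not_lt hr)
    rw [h1]
    rfl

theorem colEntry_pad (bombs : List (List Int)) (hpos : 0 < bombs.length) (c r : Nat) :
    pvColEntry bombs c r =
      (List.replicate (bombs.length - (pvVals bombs c).length) 0 ++ pvVals bombs c).getD r 0 := by
  have hm : (pvVals bombs c).length ≤ bombs.length := pvVals_len_le bombs c
  have hlen : (List.replicate (bombs.length - (pvVals bombs c).length) (0:Int)
      ++ pvVals bombs c).length = bombs.length := by
    simp; omega
  unfold pvColEntry
  by_cases hr : r < bombs.length
  · by_cases hge : bombs.length - (pvVals bombs c).length ≤ r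
    · have hm1 : 1 ≤ (pvVals bombs c).length := by omega
      rw [if_pos ⟨by omega, by omega⟩,
          List.getD_eq_getElem _ _ (by rw [List.length_reverse]; omega),
          List.getElem_reverse,
          List.getD_eq_getElem _ _ (by omega : r < _)]
      rw [List.getElem_append]
      rw [dif_neg (by simp; omega)]
      congr 1
      simp
      omega
    · rw [if_neg (by omega), List.getD_eq_getElem _ _ (by omega : r < _),
          List.getElem_append, dif_pos (by simp; omega), List.getElem_replicate]
  · rw [if_neg (by omega), List.getD_eq_default _ _ (by omega)]

theorem ports_eq (bombs : List (List Int)) : nomuhyeon bombs = nomuhyeon_alt bombs := by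
  rcases Nat.eq_zero_or_pos bombs.length with h0 | hpos
  · have hnil : bombs = [] := List.eq_nil_of_length_eq_zero h0
    subst hnil; rfl
  · have hA : nomuhyeon bombs =
        (List.range bombs.length).foldl (pvStep bombs)
          (List.replicate bombs.length (List.replicate bombs.length 0)) := rfl
    obtain ⟨L, R, ENT⟩ := outer_fold bombs hpos (List.range bombs.length) List.nodup_range
      (fun c hc => List.mem_range.mp hc)
      (List.replicate bombs.length (List.replicate bombs.length 0))
      (by simp) (fun i hi => zero_rowlen _ _ (by simpa using hi)) (fun c _ r => zero_entry _ _ _)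
    rw [hA]
    have hBlen : (nomuhyeon_alt bombs).length = bombs.length := by
      unfold nomuhyeon_alt; simp
    apply List.ext_getElem (by rw [L, hBlen])
    intro r h₁ h₂
    have hrN : r < bombs.length := by rw [← L]; exact h₁
    have hBr : (nomuhyeon_alt bombs)[r] =
        (List.range bombs.length).map (fun c =>
          (((List.range bombs.length).map (fun c =>
            List.replicate (bombs.length -
              (((List.range bombs.length).map (fun r => (bombs.getD r []).getD c 0)).filter
                (fun v => v ≠ 0)).length) 0 ++
              ((List.range bombs.length).map (fun r => (bombs.getD r []).getD c 0)).filter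
                (fun v => v ≠ 0))).getD c []).getD r 0) := by
      unfold nomuhyeon_alt
      rw [List.getElem_map, List.getElem_range]
    rw [hBr]
    have hRr := R r h₁
    rw [List.getD_eq_getElem _ _ h₁] at hRr
    apply List.ext_getElem
    · rw [hRr]; simp
    · intro c hc₁ hc₂
      have hcN : c < bombs.length := by rw [hRr] at hc₁; exact hc₁
      have hAe : ((List.range bombs.length).foldl (pvStep bombs)
          (List.replicate bombs.length (List.replicate bombs.length 0)))[r][c] =
          pvEntry ((List.range bombs.length).foldl (pvStep bombs)
            (List.replicate bombs.length (List.replicate bombs.length 0))) r c := by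
        unfold pvEntry
        have e : ((List.range bombs.length).foldl (pvStep bombs)
            (List.replicate bombs.length (List.replicate bombs.length 0))).getD r [] =
            ((List.range bombs.length).foldl (pvStep bombs)
              (List.replicate bombs.length (List.replicate bombs.length 0)))[r] :=
          List.getD_eq_getElem _ _ h₁
        rw [e, List.getD_eq_getElem _ _ hc₁]
      rw [hAe, ENT r c, if_pos (List.mem_range.mpr hcN)]
      rw [List.getElem_map, List.getElem_range]
      have hcols : (((List.range bombs.length).map (fun c =>
            List.replicate (bombs.length -
              (((List.range bombs.length).map (fun r => (bombs.getD r []).getD c 0)).filter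
                (fun v => v ≠ 0)).length) 0 ++
              ((List.range bombs.length).map (fun r => (bombs.getD r []).getD c 0)).filter
                (fun v => v ≠ 0))).getD c []) =
          List.replicate (bombs.length - (pvVals bombs c).length) 0 ++ pvVals bombs c := by
        rw [List.getD_eq_getElem _ _ (by simpa using hcN), List.getElem_map, List.getElem_range]
        rfl
      rw [hcols, colEntry_pad bombs hpos c r]

-- ===== VERDICT (by name: the statement is the Claim_ definition above) =====
theorem nomuhyeon_spec : Claim_equal_nomuhyeon := by
  intro bombs _ _
  show nomuhyeon bombs = nomuhyeon_alt bombs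
  exact ports_eq bombs
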